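-- pv_equiv track=rewrite | github.com/ArchTangent/fov-visualization | 2d/lines.py | fire_line
-- ===== SOURCE A (Python) =====
-- from typing import List, Tuple
--
-- def fire_line(x1: int, y1: int, x2: int, y2: int) -> List[Tuple[int, int]]:
--     """Fire line - 2D version. Differs slightly from Breshenham.
--
--     All lines should be reciprocal. Uses 1000 for granularity `g`."""
--     # Deltas
--     dx, dy = x2 - x1, y2 - y1
--     abs_dx, abs_dy = abs(dx), abs(dy)
--
--     if abs_dx == 0 and abs_dy == 0:
--         return [(x1, y1)]
--
--     # Sign, increment, and tile distance
--     x_inc, y_inc = 1, 1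
--     if dx < 0:
--         x_inc = -1
--     if dy < 0:
--         y_inc = -1
--     dist = 500
--
--     # Choose primary axis (Y or X)
--     if abs_dy > abs_dx:
--         dsdp = int(abs_dx / abs_dy * 1000) * x_inc
--         pri, sec = y1, x1
--         result = [(sec, pri)]
--
--         for _ in range(abs_dy):
--             pri += y_inc
--             dist += dsdp
--
--             if dist >= 1000:
--                 dist -= 1000
--                 sec += 1
--             elif dist < 0:
--                 dist += 1000
--                 sec -= 1
--
--             result.append((sec, pri))
--     else:
--         dsdp = int(abs_dy / abs_dx * 1000) * y_inc
--         pri_inc = x_inc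
--         pri, sec = x1, y1
--         result = [(pri, sec)]
--
--         for _ in range(abs_dx):
--             pri += pri_inc
--             dist += dsdp
--
--             if dist >= 1000:
--                 dist -= 1000
--                 sec += 1
--             elif dist < 0:
--                 dist += 1000
--                 sec -= 1
--
--             result.append((pri, sec))
--
--     return result
-- ===== SOURCE B (Python) =====
-- def fire_line(x1, y1, x2, y2):
--     """Fire line, closed-form: the secondary coordinate at step i is
--     sec0 + (500 + i*dsdp) // 1000 -- no running-remainder state."""
--     dx, dy = x2 - x1, y2 - y1
--     abs_dx, abs_dy = abs(dx), abs(dy)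
--
--     if abs_dx == 0 and abs_dy == 0:
--         return [(x1, y1)]
--
--     x_inc = -1 if dx < 0 else 1
--     y_inc = -1 if dy < 0 else 1
--
--     if abs_dy > abs_dx:
--         dsdp = int(abs_dx / abs_dy * 1000) * x_inc
--         return [(x1, y1)] + [(x1 + (500 + i * dsdp) // 1000, y1 + i * y_inc)
--                              for i in range(1, abs_dy + 1)]
--     else:
--         dsdp = int(abs_dy / abs_dx * 1000) * y_inc
--         return [(x1, y1)] + [(x1 + i * x_inc, y1 + (500 + i * dsdp) // 1000)
--                              for i in range(1, abs_dx + 1)]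
-- ===== Notes on version B (the rewrite author's own statement) =====
-- stated objective: simpler
-- what changed: The per-step running-remainder accumulator (dist with its >=1000 / <0 correction branches) is removed: B computes each point's secondary coordinate directly by the closed-form floor division sec0 + (500 + i*dsdp)//1000 in a single list comprehension.
import Mathlib
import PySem

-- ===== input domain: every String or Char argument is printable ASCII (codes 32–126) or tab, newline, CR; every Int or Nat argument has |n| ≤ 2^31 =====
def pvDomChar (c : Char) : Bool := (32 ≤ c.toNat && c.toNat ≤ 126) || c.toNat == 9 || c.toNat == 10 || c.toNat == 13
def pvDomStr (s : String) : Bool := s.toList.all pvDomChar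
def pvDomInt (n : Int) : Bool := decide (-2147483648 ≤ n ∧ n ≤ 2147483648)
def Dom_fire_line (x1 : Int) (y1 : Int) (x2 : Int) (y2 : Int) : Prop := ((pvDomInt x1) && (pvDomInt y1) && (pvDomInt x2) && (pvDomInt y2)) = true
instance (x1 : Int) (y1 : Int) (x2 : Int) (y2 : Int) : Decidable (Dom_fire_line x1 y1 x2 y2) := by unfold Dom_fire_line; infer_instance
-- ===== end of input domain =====

-- B replaces A's running-remainder accumulator loop by a direct closed-form
-- floor-division formula for the secondary coordinate (objective: simpler).

-- ===== PORT A =====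
-- A's Y-primary loop: `for _ in range(n)` threading (pri, sec, dist), appending (sec, pri).
-- On Dom, int(abs_dx/abs_dy*1000) equals (abs_dx*1000)//abs_dy exactly (0 ≤ abs_dx ≤ abs_dy ≤ 2^33:
-- the double-rounding relative error < 2.3e-13 cannot move abs_dx/abs_dy*1000 across an integer,
-- whose distance from a non-integer value a*1000/b is ≥ 1/b ≥ 2^-33, and an exact ratio k/1000 round-trips to k).
def fireLoopY (pinc dsdp : Int) : Nat → Int → Int → Int → List (Int × Int)
  | 0, _, _, _ => []
  | n+1, pri, sec, dist =>
    let pri' := pri + pinc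
    let d := dist + dsdp
    if d ≥ 1000 then (sec + 1, pri') :: fireLoopY pinc dsdp n pri' (sec + 1) (d - 1000)
    else if d < 0 then (sec - 1, pri') :: fireLoopY pinc dsdp n pri' (sec - 1) (d + 1000)
    else (sec, pri') :: fireLoopY pinc dsdp n pri' sec d

-- A's X-primary loop: same state, appending (pri, sec).
def fireLoopX (pinc dsdp : Int) : Nat → Int → Int → Int → List (Int × Int)
  | 0, _, _, _ => []
  | n+1, pri, sec, dist =>
    let pri' := pri + pinc
    let d := dist + dsdp
    if d ≥ 1000 then (pri', sec + 1) :: fireLoopX pinc dsdp n pri' (sec + 1) (d - 1000)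
    else if d < 0 then (pri', sec - 1) :: fireLoopX pinc dsdp n pri' (sec - 1) (d + 1000)
    else (pri', sec) :: fireLoopX pinc dsdp n pri' sec d

def fire_line (x1 : Int) (y1 : Int) (x2 : Int) (y2 : Int) : List (Int × Int) :=
  let dx := x2 - x1
  let dy := y2 - y1
  let abs_dx := |dx|
  let abs_dy := |dy|
  if abs_dx = 0 ∧ abs_dy = 0 then [(x1, y1)]
  else
    let x_inc : Int := if dx < 0 then -1 else 1
    let y_inc : Int := if dy < 0 then -1 else 1
    if abs_dy > abs_dx then
      let dsdp := PySem.Int.floordiv (abs_dx * 1000) abs_dy * x_inc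
      (x1, y1) :: fireLoopY y_inc dsdp abs_dy.toNat y1 x1 500
    else
      let dsdp := PySem.Int.floordiv (abs_dy * 1000) abs_dx * y_inc
      (x1, y1) :: fireLoopX x_inc dsdp abs_dx.toNat x1 y1 500

-- ===== PORT B =====
def fire_line_alt (x1 : Int) (y1 : Int) (x2 : Int) (y2 : Int) : List (Int × Int) :=
  let dx := x2 - x1
  let dy := y2 - y1
  let abs_dx := |dx|
  let abs_dy := |dy|
  if abs_dx = 0 ∧ abs_dy = 0 then [(x1, y1)]
  else
    let x_inc : Int := if dx < 0 then -1 else 1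
    let y_inc : Int := if dy < 0 then -1 else 1
    if abs_dy > abs_dx then
      let dsdp := PySem.Int.floordiv (abs_dx * 1000) abs_dy * x_inc
      [(x1, y1)] ++ (PySem.List.pyRange 1 (abs_dy + 1) 1).map
        (fun i => (x1 + PySem.Int.floordiv (500 + i * dsdp) 1000, y1 + i * y_inc))
    else
      let dsdp := PySem.Int.floordiv (abs_dy * 1000) abs_dx * y_inc
      [(x1, y1)] ++ (PySem.List.pyRange 1 (abs_dx + 1) 1).map
        (fun i => (x1 + i * x_inc, y1 + PySem.Int.floordiv (500 + i * dsdp) 1000))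

-- ===== PRECONDITION & SPEC =====
def Spec_fire_line (x1 : Int) (y1 : Int) (x2 : Int) (y2 : Int) (out : List (Int × Int)) : Prop := out = fire_line_alt x1 y1 x2 y2
instance (x1 : Int) (y1 : Int) (x2 : Int) (y2 : Int) (out : List (Int × Int)) : Decidable (Spec_fire_line x1 y1 x2 y2 out) := by unfold Spec_fire_line; infer_instance

-- ===== CLAIM (what is proved, stated in full; the proofs are below) =====
def Claim_equal_fire_line : Prop := ∀ (x1 : Int) (y1 : Int) (x2 : Int) (y2 : Int), Dom_fire_line x1 y1 x2 y2 → Spec_fire_line x1 y1 x2 y2 (fire_line x1 y1 x2 y2)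

-- ===== LEMMAS AND PROOFS =====

-- Invariant: with 0 ≤ dist < 1000 and |dsdp| ≤ 1000, A's corrected accumulator keeps
-- dist ∈ [0,1000) and the k-th point's secondary coordinate is sec + (dist + (k+1)*dsdp) / 1000.
theorem fireLoopY_eq (pinc dsdp : Int) (h1 : -1000 ≤ dsdp) (h2 : dsdp ≤ 1000)
    (n : Nat) (pri sec dist : Int) (hd0 : 0 ≤ dist) (hd1 : dist < 1000) :
    fireLoopY pinc dsdp n pri sec dist =
      (List.range n).map
        (fun (k : Nat) => (sec + (dist + ((k : Int) + 1) * dsdp) / 1000, pri + ((k : Int) + 1) * pinc)) := by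
  induction n generalizing pri sec dist with
  | zero => simp [fireLoopY]
  | succ n ih =>
    rw [List.range_succ_eq_map, List.map_cons, List.map_map]
    by_cases hge : dist + dsdp ≥ 1000
    · rw [fireLoopY, if_pos hge, ih _ _ _ (by omega) (by omega)]
      have hh : (dist + dsdp) / 1000 = 1 := by omega
      congr 1
      · simp [hh]
      · apply List.map_congr_left
        intro k _
        simp only [Function.comp_apply, Nat.cast_succ, Prod.mk.injEq]
        constructor
        · rw [show dist + ((k : Int) + 1 + 1) * dsdp
              = (dist + dsdp - 1000 + ((k : Int) + 1) * dsdp) + 1 * 1000 from by ring,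
            Int.add_mul_ediv_right _ _ (by norm_num : (1000:Int) ≠ 0)]
          ring
        · ring
    · rw [fireLoopY, if_neg hge]
      by_cases hlt : dist + dsdp < 0
      · rw [if_pos hlt, ih _ _ _ (by omega) (by omega)]
        have hh : (dist + dsdp) / 1000 = -1 := by omega
        congr 1
        · simp [hh, sub_eq_add_neg]
        · apply List.map_congr_left
          intro k _
          simp only [Function.comp_apply, Nat.cast_succ, Prod.mk.injEq]
          constructor
          · rw [show dist + ((k : Int) + 1 + 1) * dsdp
                = (dist + dsdp + 1000 + ((k : Int) + 1) * dsdp) + (-1) * 1000 from by ring,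
              Int.add_mul_ediv_right _ _ (by norm_num : (1000:Int) ≠ 0)]
            ring
          · ring
      · rw [if_neg hlt, ih _ _ _ (by omega) (by omega)]
        have hh : (dist + dsdp) / 1000 = 0 := by omega
        congr 1
        · simp [hh]
        · apply List.map_congr_left
          intro k _
          simp only [Function.comp_apply, Nat.cast_succ, Prod.mk.injEq]
          constructor
          · congr 2; ring
          · ring

theorem fireLoopX_eq (pinc dsdp : Int) (h1 : -1000 ≤ dsdp) (h2 : dsdp ≤ 1000)
    (n : Nat) (pri sec dist : Int) (hd0 : 0 ≤ dist) (hd1 : dist < 1000) :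
    fireLoopX pinc dsdp n pri sec dist =
      (List.range n).map
        (fun (k : Nat) => (pri + ((k : Int) + 1) * pinc, sec + (dist + ((k : Int) + 1) * dsdp) / 1000)) := by
  induction n generalizing pri sec dist with
  | zero => simp [fireLoopX]
  | succ n ih =>
    rw [List.range_succ_eq_map, List.map_cons, List.map_map]
    by_cases hge : dist + dsdp ≥ 1000
    · rw [fireLoopX, if_pos hge, ih _ _ _ (by omega) (by omega)]
      have hh : (dist + dsdp) / 1000 = 1 := by omega
      congr 1
      · simp [hh]
      · apply List.map_congr_left
        intro k _
        simp only [Function.comp_apply, Nat.cast_succ, Prod.mk.injEq]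
        constructor
        · ring
        · rw [show dist + ((k : Int) + 1 + 1) * dsdp
              = (dist + dsdp - 1000 + ((k : Int) + 1) * dsdp) + 1 * 1000 from by ring,
            Int.add_mul_ediv_right _ _ (by norm_num : (1000:Int) ≠ 0)]
          ring
    · rw [fireLoopX, if_neg hge]
      by_cases hlt : dist + dsdp < 0
      · rw [if_pos hlt, ih _ _ _ (by omega) (by omega)]
        have hh : (dist + dsdp) / 1000 = -1 := by omega
        congr 1
        · simp [hh, sub_eq_add_neg]
        · apply List.map_congr_left
          intro k _
          simp only [Function.comp_apply, Nat.cast_succ, Prod.mk.injEq]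
          constructor
          · ring
          · rw [show dist + ((k : Int) + 1 + 1) * dsdp
                = (dist + dsdp + 1000 + ((k : Int) + 1) * dsdp) + (-1) * 1000 from by ring,
              Int.add_mul_ediv_right _ _ (by norm_num : (1000:Int) ≠ 0)]
            ring
      · rw [if_neg hlt, ih _ _ _ (by omega) (by omega)]
        have hh : (dist + dsdp) / 1000 = 0 := by omega
        congr 1
        · simp [hh]
        · apply List.map_congr_left
          intro k _
          simp only [Function.comp_apply, Nat.cast_succ, Prod.mk.injEq]
          constructor
          · ring
          · congr 2; ring

theorem dsdp_bounds (m nn inc : Int) (hm : 0 ≤ m) (hmn : m ≤ nn) (h0 : 0 < nn)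
    (hinc : inc = 1 ∨ inc = -1) :
    -1000 ≤ PySem.Int.floordiv (m * 1000) nn * inc ∧ PySem.Int.floordiv (m * 1000) nn * inc ≤ 1000 := by
  have hlo : (0 : Int) ≤ PySem.Int.floordiv (m * 1000) nn := by
    rw [PySem.Int.le_floordiv_iff_mul_le h0]; nlinarith
  have hhi : PySem.Int.floordiv (m * 1000) nn < 1001 := by
    rw [PySem.Int.floordiv_lt_iff_lt_mul h0]; nlinarith
  rcases hinc with h | h <;> subst h <;> constructor <;> nlinarith

-- ===== VERDICT (by name: the statement is the Claim_ definition above) =====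
theorem fire_line_spec : Claim_equal_fire_line := by
  intro x1 y1 x2 y2 _
  show fire_line x1 y1 x2 y2 = fire_line_alt x1 y1 x2 y2
  unfold fire_line fire_line_alt
  set dx := x2 - x1 with hdx
  set dy := y2 - y1 with hdy
  have hdxnn := abs_nonneg dx
  have hdynn := abs_nonneg dy
  by_cases h0 : |dx| = 0 ∧ |dy| = 0
  · simp [h0]
  · simp only [if_neg h0]
    set x_inc : Int := if dx < 0 then -1 else 1 with hxinc
    set y_inc : Int := if dy < 0 then -1 else 1 with hyinc
    have hxi : x_inc = 1 ∨ x_inc = -1 := by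
      rw [hxinc]; split_ifs <;> simp
    have hyi : y_inc = 1 ∨ y_inc = -1 := by
      rw [hyinc]; split_ifs <;> simp
    by_cases hcmp : |dy| > |dx|
    · simp only [if_pos hcmp]
      set dsdp := PySem.Int.floordiv (|dx| * 1000) |dy| * x_inc with hdsdp
      obtain ⟨hb1, hb2⟩ := dsdp_bounds |dx| |dy| x_inc hdxnn (le_of_lt hcmp)
        (lt_of_le_of_lt hdxnn hcmp) hxi
      rw [fireLoopY_eq y_inc dsdp hb1 hb2 _ _ _ _ (by norm_num) (by norm_num)]
      rw [PySem.List.pyRange_one 1 (|dy| + 1)]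
      simp only [add_sub_cancel_right, List.map_map, List.singleton_append]
      congr 1
      apply List.map_congr_left
      intro k _
      simp only [Function.comp_apply]
      rw [show (1 : Int) + (k : Int) = (k : Int) + 1 from by ring,
        PySem.Int.floordiv_eq_ediv_of_pos (a := 500 + ((k : Int) + 1) * dsdp) (by norm_num : (0:Int) < 1000)]
    · simp only [if_neg hcmp]
      have hle : |dy| ≤ |dx| := not_lt.mp hcmp
      have hax : 0 < |dx| := by
        rcases hdxnn.lt_or_eq with h | h
        · exact h
        · exact absurd ⟨h.symm, by omega⟩ h0
      set dsdp := PySem.Int.floordiv (|dy| * 1000) |dx| * y_inc with hdsdp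
      obtain ⟨hb1, hb2⟩ := dsdp_bounds |dy| |dx| y_inc hdynn hle hax hyi
      rw [fireLoopX_eq x_inc dsdp hb1 hb2 _ _ _ _ (by norm_num) (by norm_num)]
      rw [PySem.List.pyRange_one 1 (|dx| + 1)]
      simp only [add_sub_cancel_right, List.map_map, List.singleton_append]
      congr 1
      apply List.map_congr_left
      intro k _
      simp only [Function.comp_apply]
      rw [show (1 : Int) + (k : Int) = (k : Int) + 1 from by ring,
        PySem.Int.floordiv_eq_ediv_of_pos (a := 500 + ((k : Int) + 1) * dsdp) (by norm_num : (0:Int) < 1000)]
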